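-- pv_equiv track=rewrite | github.com/nermadie/CodeForces_Solutions | CodeforcesRound928Div4/prob05.py | solve
-- ===== SOURCE A (Python) =====
-- def solve(n, k):
--     cur_count = 0
--     if n % 2 == 0:
--         cur_count = n // 2
--     else:
--         cur_count = n // 2 + 1
--     if k <= cur_count:
--         return 2 * k - 1
--     exp_2 = 0
--     prev_count = 0
--     while k > cur_count:
--         exp_2 += 1
--         prev_count = cur_count
--         all_divisors = n // (1 << exp_2)
--         if all_divisors % 2 == 0:
--             cur_count += all_divisors // 2
--         else:
--             cur_count += all_divisors // 2 + 1
--     return ((k - prev_count) * 2 - 1) * (1 << exp_2)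
-- ===== SOURCE B (Python) =====
-- def solve(n, k):
--     c = (n + 1) // 2
--     if k <= c:
--         return 2 * k - 1
--     return 2 * solve(n // 2, k - c)
-- ===== Notes on version B (the rewrite author's own statement) =====
-- stated objective: simpler
-- what changed: Replaced the accumulating while-loop over increasing powers of two with a three-line divide-and-conquer recursion: the even-valued tail of the arrangement on 1..n is 2x the same arrangement on 1..n//2.
import Mathlib
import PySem

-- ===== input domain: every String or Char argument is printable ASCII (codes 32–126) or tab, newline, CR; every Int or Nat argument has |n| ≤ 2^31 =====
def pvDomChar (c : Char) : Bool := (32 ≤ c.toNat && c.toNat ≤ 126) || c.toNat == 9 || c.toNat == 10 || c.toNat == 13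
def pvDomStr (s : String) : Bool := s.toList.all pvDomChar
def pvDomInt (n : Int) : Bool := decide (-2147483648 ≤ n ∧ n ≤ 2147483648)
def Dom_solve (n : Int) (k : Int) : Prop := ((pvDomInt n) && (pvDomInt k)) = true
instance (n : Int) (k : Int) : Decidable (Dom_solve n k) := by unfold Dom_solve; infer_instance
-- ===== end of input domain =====

-- B replaces A's accumulating while-loop over increasing powers of two with a short
-- divide-and-conquer recursion (the even-valued tail of the arrangement equals 2x the
-- arrangement on 1..n//2); objective: simpler, same asymptotic cost.


-- ===== PORT A =====
-- A's while-loop, as fuel recursion over the same state (exp_2, prev_count, cur_count);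
-- fuel 0 returns the sentinel 0 (never a loop result, which is odd*2^e); under Pre_ the
-- fuel n.toNat + 1 is proved sufficient.  Python's `n // (1 << e)` is
-- `PySem.Int.floordiv n (2 ^ e)` (same value).
def solveLoop (n k : Int) (fuel : Nat) (exp2 : Nat) (prev cur : Int) : Int :=
  match fuel with
  | 0 => 0
  | fuel + 1 =>
    if cur < k then
      let e := exp2 + 1
      let ad := PySem.Int.floordiv n (2 ^ e)
      let inc := if PySem.Int.mod ad 2 = 0 then PySem.Int.floordiv ad 2
                 else PySem.Int.floordiv ad 2 + 1
      solveLoop n k fuel e cur (cur + inc)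
    else ((k - prev) * 2 - 1) * 2 ^ exp2

def solve (n : Int) (k : Int) : Int :=
  let cur0 : Int := if PySem.Int.mod n 2 = 0 then PySem.Int.floordiv n 2
                    else PySem.Int.floordiv n 2 + 1
  if k ≤ cur0 then 2 * k - 1
  else solveLoop n k (n.toNat + 1) 0 0 cur0

-- ===== PORT B =====
-- `if h : 0 < n` is only a totality guard for the well-founded recursion; inside Pre_
-- the else-branch is unreachable (k > c forces n ≥ 2 there).
def solve_alt (n : Int) (k : Int) : Int :=
  let c := PySem.Int.floordiv (n + 1) 2
  if k ≤ c then 2 * k - 1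
  else if h : 0 < n then 2 * solve_alt (PySem.Int.floordiv n 2) (k - c)
  else 0
termination_by n.toNat
decreasing_by
  simp only [PySem.Int.floordiv_eq_ediv_of_pos (a := n) (by omega : (0:Int) < 2)]
  omega

-- ===== PRECONDITION & SPEC =====
-- Pre_ is exactly the set of inputs on which Python A returns: either k lands in the
-- first (odd) group, or 1 ≤ k ≤ n; on every other input A's while-loop never terminates.
def Pre_solve (n : Int) (k : Int) : Prop :=
  k ≤ PySem.Int.floordiv (n + 1) 2 ∨ (1 ≤ k ∧ k ≤ n)
instance (n : Int) (k : Int) : Decidable (Pre_solve n k) := by unfold Pre_solve; infer_instance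
def pvWitness_solve : Int × Int := (10, 8)

def Spec_solve (n : Int) (k : Int) (out : Int) : Prop := out = solve_alt n k
instance (n : Int) (k : Int) (out : Int) : Decidable (Spec_solve n k out) := by unfold Spec_solve; infer_instance

-- ===== CLAIM (what is proved, stated in full; the proofs are below) =====
def Claim_equal_solve : Prop := ∀ (n : Int) (k : Int), Dom_solve n k → Pre_solve n k → Spec_solve n k (solve n k)

-- ===== LEMMAS AND PROOFS =====

theorem floordiv_two (a : Int) : PySem.Int.floordiv a 2 = a / 2 :=
  PySem.Int.floordiv_eq_ediv_of_pos (by omega)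

theorem mod_two (a : Int) : PySem.Int.mod a 2 = a % 2 :=
  PySem.Int.mod_eq_emod_of_pos (by omega)

-- A's parity-branch count equals B's single expression (n+1)/2
theorem ceil_branch (a : Int) :
    (if PySem.Int.mod a 2 = 0 then PySem.Int.floordiv a 2 else PySem.Int.floordiv a 2 + 1)
      = (a + 1) / 2 := by
  simp only [floordiv_two, mod_two]
  split_ifs with h <;> omega

theorem floordiv_pow (n : Int) (e : Nat) :
    PySem.Int.floordiv n (2 ^ e) = n / (2 ^ e : Nat) := by
  apply PySem.Int.floordiv_eq_ediv_of_pos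
  positivity

-- scaling: the loop on n at depth e+1 equals 2x the loop on n/2 at depth e,
-- with all counts shifted by an arbitrary constant c
theorem solveLoop_scale (n k c : Int) :
    ∀ (fuel : Nat) (e : Nat) (prev cur : Int),
      solveLoop n k fuel (e + 1) prev cur
        = 2 * solveLoop (n / 2) (k - c) fuel e (prev - c) (cur - c) := by
  intro fuel
  induction fuel with
  | zero => intro e prev cur; simp [solveLoop]
  | succ f ih =>
    intro e prev cur
    simp only [solveLoop]
    have hcond : cur < k ↔ cur - c < k - c := by omega
    by_cases h : cur < k
    · rw [if_pos h, if_pos (hcond.mp h)]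
      have hdd : PySem.Int.floordiv n (2 ^ (e + 1 + 1))
          = PySem.Int.floordiv (n / 2) (2 ^ (e + 1)) := by
        rw [floordiv_pow, floordiv_pow]
        have h2 : ((2 ^ (e + 1 + 1) : Nat) : Int) = 2 * (2 ^ (e + 1) : Nat) := by
          push_cast; ring
        rw [h2, ← Int.ediv_ediv_of_nonneg (by omega : (0:Int) ≤ 2)]
      rw [hdd]
      have h3 := ih (e + 1) cur
        (cur + (if PySem.Int.mod (PySem.Int.floordiv (n / 2) (2 ^ (e + 1))) 2 = 0
                then PySem.Int.floordiv (PySem.Int.floordiv (n / 2) (2 ^ (e + 1))) 2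
                else PySem.Int.floordiv (PySem.Int.floordiv (n / 2) (2 ^ (e + 1))) 2 + 1))
      rw [h3]
      ring_nf
    · rw [if_neg h, if_neg (fun hc => h (hcond.mpr hc))]
      ring

-- a non-sentinel loop result is stable under extra fuel
theorem solveLoop_fuel_mono (n k : Int) :
    ∀ (f g : Nat) (e : Nat) (prev cur : Int), f ≤ g →
      solveLoop n k f e prev cur ≠ 0 →
      solveLoop n k g e prev cur = solveLoop n k f e prev cur := by
  intro f
  induction f with
  | zero => intro g e prev cur _ hne; exact absurd rfl hne
  | succ f ih =>
    intro g e prev cur hle hne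
    obtain ⟨g', rfl⟩ : ∃ g', g = g' + 1 := ⟨g - 1, by omega⟩
    simp only [solveLoop] at hne ⊢
    by_cases h : cur < k
    · simp only [if_pos h] at hne ⊢
      exact ih g' (e + 1) cur _ (by omega) hne
    · simp only [if_neg h] at hne ⊢

theorem solve_alt_unfold (n k : Int) :
    solve_alt n k =
      if k ≤ PySem.Int.floordiv (n + 1) 2 then 2 * k - 1
      else if 0 < n then 2 * solve_alt (PySem.Int.floordiv n 2) (k - PySem.Int.floordiv (n + 1) 2)
      else 0 := by
  rw [solve_alt]
  split_ifs <;> simp_all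

-- B's result is positive whenever 1 ≤ k ≤ n (so never the sentinel 0)
theorem solve_alt_pos : ∀ (N : Nat) (n k : Int), n.toNat ≤ N → 1 ≤ k → k ≤ n → 0 < solve_alt n k := by
  intro N
  induction N using Nat.strong_induction_on with
  | _ N ih =>
    intro n k hN hk1 hkn
    rw [solve_alt_unfold]
    simp only [floordiv_two,
      PySem.Int.floordiv_eq_ediv_of_pos (a := n + 1) (by omega : (0:Int) < 2)]
    split_ifs with h1 h2
    · omega
    · have hrec : 0 < solve_alt (n / 2) (k - (n + 1) / 2) :=
        ih (n / 2).toNat (by omega) (n / 2) _ le_rfl (by omega) (by omega)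
      omega
    · omega

theorem solve_eq_alt : ∀ (N : Nat) (n k : Int), n.toNat ≤ N → Pre_solve n k → solve n k = solve_alt n k := by
  intro N
  induction N using Nat.strong_induction_on with
  | _ N ih =>
    intro n k hN hpre
    have hc : PySem.Int.floordiv (n + 1) 2 = (n + 1) / 2 := floordiv_two _
    rw [solve_alt_unfold, solve]
    simp only [ceil_branch, ← hc]
    by_cases hk : k ≤ PySem.Int.floordiv (n + 1) 2
    · rw [if_pos hk, if_pos hk]
    · rw [if_neg hk, if_neg hk]
      have hkn : 1 ≤ k ∧ k ≤ n := by
        rcases hpre with h | h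
        · exact absurd h hk
        · exact h
      have hn2 : 2 ≤ n := by rw [hc] at hk; omega
      rw [if_pos (by omega : (0:Int) < n)]
      -- run one iteration of the loop, then rescale it to the loop on n/2
      obtain ⟨f, hf⟩ : ∃ f, n.toNat + 1 = f + 1 := ⟨n.toNat, rfl⟩
      rw [hf]
      simp only [solveLoop]
      rw [if_pos (by omega : PySem.Int.floordiv (n + 1) 2 < k)]
      have had : PySem.Int.floordiv n (2 ^ (0 + 1)) = PySem.Int.floordiv n 2 := by norm_num
      rw [had, ceil_branch]
      set c := PySem.Int.floordiv (n + 1) 2 with hcdef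
      set m := PySem.Int.floordiv n 2 with hmdef
      have hm : m = n / 2 := floordiv_two n
      have hscale := solveLoop_scale n k c f 0 c (c + (m + 1) / 2)
      rw [show (0:Nat) + 1 = 0 + 1 from rfl] at hscale
      rw [hscale, ← hm]
      have hsimp1 : c - c = 0 := by ring
      have hsimp2 : c + (m + 1) / 2 - c = (m + 1) / 2 := by ring
      rw [hsimp1, hsimp2]
      -- now compare 2 * solveLoop m (k-c) f 0 0 ((m+1)/2) with 2 * solve_alt m (k-c)
      have hcm : PySem.Int.floordiv (m + 1) 2 = (m + 1) / 2 := floordiv_two _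
      by_cases hk2 : k - c ≤ (m + 1) / 2
      · -- loop exits immediately; B's first branch
        obtain ⟨f', hf'⟩ : ∃ f', f = f' + 1 := ⟨f - 1, by omega⟩
        rw [hf']
        simp only [solveLoop]
        rw [if_neg (by omega : ¬ ((m + 1) / 2 < k - c))]
        rw [solve_alt_unfold, if_pos (by rw [hcm]; omega)]
        ring
      · -- loop continues: it is exactly `solve m (k-c)`'s loop with smaller fuel
        have hmn : 1 ≤ k - c ∧ k - c ≤ m := by rw [hm] at *; constructor <;> omega
        have hsolve_m : solve m (k - c) = solve_alt m (k - c) := by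
          apply ih m.toNat (by rw [hm]; omega) m (k - c) le_rfl
          right; exact hmn
        have hpos : 0 < solve_alt m (k - c) :=
          solve_alt_pos m.toNat m (k - c) le_rfl hmn.1 hmn.2
        have hsolve_m' : solveLoop m (k - c) (m.toNat + 1) 0 0 ((m + 1) / 2) = solve_alt m (k - c) := by
          rw [← hsolve_m, solve]
          simp only [ceil_branch]
          rw [if_neg (by omega : ¬ (k - c ≤ (m + 1) / 2))]
        have hmono := solveLoop_fuel_mono m (k - c) (m.toNat + 1) f 0 0 ((m + 1) / 2)
          (by rw [hm] at *; omega) (by rw [hsolve_m']; omega)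
        rw [hmono, hsolve_m']

-- ===== VERDICT (by name: the statement is the Claim_ definition above) =====
theorem solve_spec : Claim_equal_solve := by
  intro n k _ hpre
  exact solve_eq_alt n.toNat n k le_rfl hpre
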